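-- pv_equiv track=rewrite | github.com/HwiHwi523/Algorithm | Baekjoon/BOJ_7578_공장.py | get_ms_tree
-- ===== SOURCE A (Python) =====
-- def get_ms_tree(n, nums2, idx_of_a):
--     ms_tree = [[] for _ in range(n << 1)]
--
--     for idx, val in enumerate(nums2):
--         ms_tree[idx + n].append(idx_of_a[val])
--     for i in range(n - 1, 0, -1):
--         left = i << 1
--         right = left + 1
--         l_cursor = r_cursor = 0
--         while l_cursor < len(ms_tree[left]) and r_cursor < len(ms_tree[right]):
--             if ms_tree[left][l_cursor] < ms_tree[right][r_cursor]:
--                 ms_tree[i].append(ms_tree[left][l_cursor])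
--                 l_cursor += 1
--             else:
--                 ms_tree[i].append(ms_tree[right][r_cursor])
--                 r_cursor += 1
--
--         while l_cursor < len(ms_tree[left]):
--             ms_tree[i].append(ms_tree[left][l_cursor])
--             l_cursor += 1
--
--         while r_cursor < len(ms_tree[right]):
--             ms_tree[i].append(ms_tree[right][r_cursor])
--             r_cursor += 1
--
--     return ms_tree
-- ===== SOURCE B (Python) =====
-- def get_ms_tree(n, nums2, idx_of_a):
--     leaf = [[idx_of_a[v]] for v in nums2]
--     memo = {}
--
--     def node(i):
--         res = memo.get(i)
--         if res is not None:
--             return res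
--         if i >= n:
--             res = leaf[i - n] if i - n < len(leaf) else []
--         else:
--             res = sorted(node(2 * i) + node(2 * i + 1))
--         memo[i] = res
--         return res
--
--     return [node(i) if i >= 1 else [] for i in range(n << 1)]
-- ===== Notes on version B (the rewrite author's own statement) =====
-- stated objective: alternative
-- what changed: B abandons A's bottom-up in-place 2n-array with a hand-written two-pointer merge and instead computes each tree slot by a top-down memoised recursion node(i) (leaf lookup at i>=n, sorted concatenation of the two recursive children otherwise, cached in a dict), emitting the output as one comprehension over range(2n).
import Mathlib
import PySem

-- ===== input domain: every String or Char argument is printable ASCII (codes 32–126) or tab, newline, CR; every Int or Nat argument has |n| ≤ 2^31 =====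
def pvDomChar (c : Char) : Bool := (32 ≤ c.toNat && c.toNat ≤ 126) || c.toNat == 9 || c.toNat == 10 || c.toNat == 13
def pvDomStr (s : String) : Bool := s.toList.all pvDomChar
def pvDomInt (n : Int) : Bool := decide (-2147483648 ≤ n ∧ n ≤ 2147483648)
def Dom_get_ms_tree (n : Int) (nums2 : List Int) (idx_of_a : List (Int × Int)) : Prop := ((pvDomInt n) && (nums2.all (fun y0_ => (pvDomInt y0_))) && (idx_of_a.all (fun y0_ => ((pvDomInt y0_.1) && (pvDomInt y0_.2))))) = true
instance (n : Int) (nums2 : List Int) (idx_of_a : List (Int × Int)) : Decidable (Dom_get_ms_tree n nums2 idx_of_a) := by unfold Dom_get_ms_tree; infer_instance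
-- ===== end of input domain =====

-- B replaces A's bottom-up in-place array construction (hand-written two-pointer merge of the
-- children into each slot) by an independent top-down recursive computation of every slot.
-- Objective: alternative (same result, genuinely different algorithmic organisation).

-- ===== PORT A =====
-- the three while-loops of A's two-pointer merge: first the comparison loop, then the two drains
def pvMergeA : List Int → List Int → List Int
  | [], r => r
  | l, [] => l
  | a :: l, b :: r => if a < b then a :: pvMergeA l (b :: r) else b :: pvMergeA (a :: l) r

def get_ms_tree (n : Int) (nums2 : List Int) (idx_of_a : List (Int × Int)) : List (List Int) :=
  let t0 : List (List Int) := List.replicate (2 * n).toNat []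
  let t1 := (PySem.List.enumerate nums2).foldl
    (fun t p => PySem.List.pySetD t (p.1 + n)
        (PySem.List.pyGetD t (p.1 + n) [] ++ [PySem.Dict.getD (PySem.Dict.mk idx_of_a) p.2 0])) t0
  (PySem.List.pyRange (n - 1) 0 (-1)).foldl
    (fun t i => PySem.List.pySetD t i
        (pvMergeA (PySem.List.pyGetD t (2 * i) []) (PySem.List.pyGetD t (2 * i + 1) []))) t1

-- ===== PORT B =====
-- B's leaf table: [[idx_of_a[v]] for v in nums2]
def pvLeaf (nums2 : List Int) (idx_of_a : List (Int × Int)) : List (List Int) :=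
  nums2.map (fun v => [PySem.Dict.getD (PySem.Dict.mk idx_of_a) v 0])

-- B's memoised recursive node(i), threading the memo dict explicitly; the 'i < 1' branch is a
-- totality guard only (B calls node with i >= 1, where the recursion provably terminates)
def pvNodeM (n : Int) (leaf : List (List Int)) (i : Int) (memo : PySem.Dict Int (List Int)) :
    List Int × PySem.Dict Int (List Int) :=
  match memo.get? i with
  | some res => (res, memo)
  | none =>
    if i < 1 then ([], memo)
    else if n ≤ i then
      let res := if i - n < (leaf.length : Int) then leaf.getD (i - n).toNat [] else []
      (res, memo.insert i res)
    else
      let lm := pvNodeM n leaf (2 * i) memo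
      let rm := pvNodeM n leaf (2 * i + 1) lm.2
      let res := PySem.List.sorted (lm.1 ++ rm.1) (fun x => x)
      (res, rm.2.insert i res)
  termination_by (2 * n - i).toNat
  decreasing_by all_goals omega

def get_ms_tree_alt (n : Int) (nums2 : List Int) (idx_of_a : List (Int × Int)) : List (List Int) :=
  let leaf := pvLeaf nums2 idx_of_a
  ((PySem.List.pyRange 0 (2 * n) 1).foldl
    (fun (acc : List (List Int) × PySem.Dict Int (List Int)) i =>
      if 1 ≤ i then
        let rm := pvNodeM n leaf i acc.2
        (acc.1 ++ [rm.1], rm.2)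
      else (acc.1 ++ [[]], acc.2))
    ([], PySem.Dict.empty)).1

-- ===== PRECONDITION & SPEC =====
-- Pre_ excludes exactly the inputs on which A raises: an IndexError when nums2 is longer than n
-- (or nums2 nonempty with n < 0), and a KeyError when some value of nums2 is not a key of idx_of_a.
def Pre_get_ms_tree (n : Int) (nums2 : List Int) (idx_of_a : List (Int × Int)) : Prop :=
  (0 ≤ n ∧ (nums2.length : Int) ≤ n ∧
     ∀ v ∈ nums2, ((PySem.Dict.mk idx_of_a).get? v).isSome = true)
  ∨ (n < 0 ∧ nums2 = [])
instance (n : Int) (nums2 : List Int) (idx_of_a : List (Int × Int)) : Decidable (Pre_get_ms_tree n nums2 idx_of_a) := by unfold Pre_get_ms_tree; infer_instance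

def pvWitness_get_ms_tree : Int × List Int × (List (Int × Int)) := (2, [1, 0], [(0, 5), (1, 7)])

def Spec_get_ms_tree (n : Int) (nums2 : List Int) (idx_of_a : List (Int × Int)) (out : List (List Int)) : Prop := out = get_ms_tree_alt n nums2 idx_of_a
instance (n : Int) (nums2 : List Int) (idx_of_a : List (Int × Int)) (out : List (List Int)) : Decidable (Spec_get_ms_tree n nums2 idx_of_a out) := by unfold Spec_get_ms_tree; infer_instance

-- ===== CLAIM (what is proved, stated in full; the proofs are below) =====
def Claim_equal_get_ms_tree : Prop := ∀ (n : Int) (nums2 : List Int) (idx_of_a : List (Int × Int)), Dom_get_ms_tree n nums2 idx_of_a → Pre_get_ms_tree n nums2 idx_of_a → Spec_get_ms_tree n nums2 idx_of_a (get_ms_tree n nums2 idx_of_a)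

-- ===== LEMMAS AND PROOFS =====

-- unmemoised specification of B's node(i), used only by the proofs below
def pvNode (n : Int) (leaf : List (List Int)) (i : Int) : List Int :=
  if i < 1 then []
  else if n ≤ i then
    (if i - n < (leaf.length : Int) then leaf.getD (i - n).toNat [] else [])
  else PySem.List.sorted (pvNode n leaf (2 * i) ++ pvNode n leaf (2 * i + 1)) (fun x => x)
  termination_by (2 * n - i).toNat
  decreasing_by all_goals omega

-- memo invariant: every stored value is the node value
def pvInv (n : Int) (leaf : List (List Int)) (m : PySem.Dict Int (List Int)) : Prop :=
  ∀ k v, m.get? k = some v → v = pvNode n leaf k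

lemma pvInv_empty (n : Int) (leaf : List (List Int)) : pvInv n leaf PySem.Dict.empty := by
  intro k v h
  simp [PySem.Dict.get?_empty] at h

lemma pvInv_insert (n : Int) (leaf : List (List Int)) (m : PySem.Dict Int (List Int))
    (hm : pvInv n leaf m) (k : Int) (v : List Int) (hv : v = pvNode n leaf k) :
    pvInv n leaf (m.insert k v) := by
  intro k' v' h
  rw [PySem.Dict.get?_insert] at h
  split at h
  · rename_i hk
    cases h
    rw [hk]
    exact hv
  · exact hm k' v' h

lemma pvNodeM_correct (n : Int) (leaf : List (List Int)) :
    ∀ (i : Int) (m : PySem.Dict Int (List Int)), pvInv n leaf m →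
      (pvNodeM n leaf i m).1 = pvNode n leaf i ∧ pvInv n leaf (pvNodeM n leaf i m).2
  | i, m, hm => by
    rw [pvNodeM]
    cases hg : m.get? i with
    | some res => exact ⟨hm i res hg, hm⟩
    | none =>
      by_cases h1 : i < 1
      · rw [if_pos h1]
        exact ⟨by rw [pvNode, if_pos h1], hm⟩
      · rw [if_neg h1]
        by_cases h2 : n ≤ i
        · rw [if_pos h2]
          have hv : (if i - n < (leaf.length : Int) then leaf.getD (i - n).toNat [] else [])
              = pvNode n leaf i := by rw [pvNode, if_neg h1, if_pos h2]
          exact ⟨hv, pvInv_insert n leaf m hm i _ hv⟩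
        · rw [if_neg h2]
          obtain ⟨hl, hml⟩ := pvNodeM_correct n leaf (2 * i) m hm
          obtain ⟨hr, hmr⟩ := pvNodeM_correct n leaf (2 * i + 1) (pvNodeM n leaf (2 * i) m).2 hml
          have hv : PySem.List.sorted ((pvNodeM n leaf (2 * i) m).1
                ++ (pvNodeM n leaf (2 * i + 1) (pvNodeM n leaf (2 * i) m).2).1) (fun x => x)
              = pvNode n leaf i := by
            conv_rhs => rw [pvNode]
            rw [if_neg h1, if_neg h2, hl, hr]
          exact ⟨hv, pvInv_insert n leaf _ hmr i _ hv⟩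
  termination_by i => (2 * n - i).toNat
  decreasing_by all_goals omega

-- B's comprehension, threading the memo, equals the plain map of node values
lemma pvFoldM_eq (n : Int) (leaf : List (List Int)) :
    ∀ (is : List Int) (acc : List (List Int)) (m : PySem.Dict Int (List Int)), pvInv n leaf m →
      (is.foldl (fun (acc : List (List Int) × PySem.Dict Int (List Int)) i =>
          if 1 ≤ i then
            let rm := pvNodeM n leaf i acc.2
            (acc.1 ++ [rm.1], rm.2)
          else (acc.1 ++ [[]], acc.2)) (acc, m)).1
      = acc ++ is.map (fun i => if 1 ≤ i then pvNode n leaf i else [])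
  | [], acc, m, _ => by simp
  | i :: is, acc, m, hm => by
    rw [List.foldl_cons, List.map_cons]
    by_cases h1 : 1 ≤ i
    · obtain ⟨hv, hm'⟩ := pvNodeM_correct n leaf i m hm
      rw [if_pos h1, if_pos h1]
      show (is.foldl _ ((acc ++ [(pvNodeM n leaf i m).1], (pvNodeM n leaf i m).2))).1 = _
      rw [pvFoldM_eq n leaf is _ _ hm', hv]
      simp
    · rw [if_neg h1, if_neg h1]
      show (is.foldl _ ((acc ++ [[]], m))).1 = _
      rw [pvFoldM_eq n leaf is _ _ hm]
      simp

lemma pvShort_pairwise {l : List Int} (h : l.length ≤ 1) : l.Pairwise (· ≤ ·) := by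
  match l with
  | [] => simp
  | [a] => simp
  | a :: b :: t => simp at h

lemma pvMergeA_perm : ∀ (L R : List Int), (pvMergeA L R).Perm (L ++ R)
  | [], r => by simp [pvMergeA]
  | a :: l, [] => by simp [pvMergeA]
  | a :: l, b :: r => by
    rw [pvMergeA]
    split
    · exact (pvMergeA_perm l (b :: r)).cons a
    · exact ((pvMergeA_perm (a :: l) r).cons b).trans List.perm_middle.symm

lemma pvMergeA_pairwise : ∀ (L R : List Int), L.Pairwise (· ≤ ·) → R.Pairwise (· ≤ ·) →
    (pvMergeA L R).Pairwise (· ≤ ·)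
  | [], r, _, hr => by simpa [pvMergeA] using hr
  | a :: l, [], hl, _ => by simpa [pvMergeA] using hl
  | a :: l, b :: r, hl, hr => by
    rw [pvMergeA]
    rcases List.pairwise_cons.mp hl with ⟨ha, hl'⟩
    rcases List.pairwise_cons.mp hr with ⟨hb, hr'⟩
    split
    · rename_i hab
      refine List.pairwise_cons.mpr ⟨?_, pvMergeA_pairwise l (b :: r) hl' hr⟩
      intro x hx
      rcases List.mem_append.mp ((pvMergeA_perm l (b :: r)).mem_iff.mp hx) with h | h
      · exact ha x h
      · rcases List.mem_cons.mp h with rfl | h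
        · exact le_of_lt hab
        · exact le_trans (le_of_lt hab) (hb x h)
    · rename_i hab
      have hba : b ≤ a := le_of_not_gt hab
      refine List.pairwise_cons.mpr ⟨?_, pvMergeA_pairwise (a :: l) r hl hr'⟩
      intro x hx
      rcases List.mem_append.mp ((pvMergeA_perm (a :: l) r).mem_iff.mp hx) with h | h
      · rcases List.mem_cons.mp h with rfl | h
        · exact hba
        · exact le_trans hba (ha x h)
      · exact hb x h

lemma pvSorted_eq_merge (L R : List Int) (hL : L.Pairwise (· ≤ ·)) (hR : R.Pairwise (· ≤ ·)) :
    PySem.List.sorted (L ++ R) (fun x => x) = pvMergeA L R :=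
  PySem.List.sorted_id_eq_of_perm_of_pairwise _ _ (pvMergeA_perm L R) (pvMergeA_pairwise L R hL hR)

-- every slot B computes is sorted (leaves hold at most one element)
lemma pvNode_pairwise (n : Int) (leaf : List (List Int))
    (hleaf : ∀ l ∈ leaf, l.length ≤ 1) (i : Int) : (pvNode n leaf i).Pairwise (· ≤ ·) := by
    rw [pvNode]
    split
    · simp
    · split
      · split
        · rename_i h1 h2 h3
          apply pvShort_pairwise
          apply hleaf
          rw [List.getD_eq_getElem?_getD]
          have hlt : (i - n).toNat < leaf.length := by omega
          rw [List.getElem?_eq_getElem hlt]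
          exact List.getElem_mem hlt
        · simp
      · have := PySem.List.sorted_pairwise
          (pvNode n leaf (2 * i) ++ pvNode n leaf (2 * i + 1)) (fun x => x)
        simpa using this

-- B's combine step, rephrased as A's merge
lemma pvNode_combine (n : Int) (leaf : List (List Int))
    (hleaf : ∀ l ∈ leaf, l.length ≤ 1) (i : Int) (h1 : 1 ≤ i) (h2 : i < n) :
    pvNode n leaf i = pvMergeA (pvNode n leaf (2 * i)) (pvNode n leaf (2 * i + 1)) := by
  rw [pvNode]
  rw [if_neg (by omega), if_neg (by omega)]
  exact pvSorted_eq_merge _ _ (pvNode_pairwise n leaf hleaf _) (pvNode_pairwise n leaf hleaf _)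

-- a fold of pySetD steps never changes the length
lemma pvFoldl_len {α : Type} (f : List (List Int) → α → Int) (g : List (List Int) → α → List Int) :
    ∀ (l : List α) (t : List (List Int)),
      (l.foldl (fun t x => PySem.List.pySetD t (f t x) (g t x)) t).length = t.length
  | [], t => rfl
  | x :: l, t => by
    rw [List.foldl_cons, pvFoldl_len f g l]
    exact PySem.List.length_pySetD ..

-- A's leaf-filling pass, characterised slotwise
lemma pvFill_char (n : Int) (idx_of_a : List (Int × Int)) :
    ∀ (xs : List Int) (s : Int) (t : List (List Int)), 0 ≤ s + n →
      s + n + xs.length ≤ (t.length : Int) →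
      ∀ (j : Nat),
      ((PySem.List.enumerate xs s).foldl
        (fun t p => PySem.List.pySetD t (p.1 + n)
          (PySem.List.pyGetD t (p.1 + n) [] ++ [PySem.Dict.getD (PySem.Dict.mk idx_of_a) p.2 0])) t).getD j []
      = if s + n ≤ (j : Int) ∧ (j : Int) < s + n + xs.length then
          t.getD j [] ++ [PySem.Dict.getD (PySem.Dict.mk idx_of_a) (xs.getD ((j : Int) - s - n).toNat 0) 0]
        else t.getD j []
  | [], s, t, _, _, j => by
    rw [show PySem.List.enumerate ([] : List Int) s = [] from rfl, List.foldl_nil,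
        if_neg (by simp only [List.length_nil, Nat.cast_zero, add_zero]; omega)]
  | x :: xs, s, t, hs, hlen, j => by
    have hlc : (((x :: xs).length : Nat) : Int) = (xs.length : Int) + 1 := by simp
    rw [PySem.List.enumerate_cons, List.foldl_cons]
    have hset : PySem.List.pySetD t (s + n)
        (PySem.List.pyGetD t (s + n) [] ++ [PySem.Dict.getD (PySem.Dict.mk idx_of_a) x 0])
        = t.set (s + n).toNat (t.getD (s + n).toNat [] ++ [PySem.Dict.getD (PySem.Dict.mk idx_of_a) x 0]) := by
      rw [PySem.List.pySetD_of_nonneg _ _ hs, PySem.List.pyGetD_of_nonneg _ _ hs]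
    rw [hset]
    have hlen' : s + 1 + n + xs.length ≤ (((t.set (s + n).toNat
        (t.getD (s + n).toNat [] ++ [PySem.Dict.getD (PySem.Dict.mk idx_of_a) x 0])).length : Int)) := by
      rw [List.length_set]
      omega
    rw [pvFill_char n idx_of_a xs (s + 1) _ (by omega) hlen' j]
    by_cases hj : s + 1 + n ≤ (j : Int) ∧ (j : Int) < s + 1 + n + xs.length
    · rw [if_pos hj, if_pos (by omega)]
      have hne : j ≠ (s + n).toNat := by omega
      rw [List.getD_eq_getElem?_getD, List.getElem?_set_ne (by omega), ← List.getD_eq_getElem?_getD]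
      have hidx : ((j : Int) - (s + 1) - n).toNat + 1 = ((j : Int) - s - n).toNat := by omega
      have hxs : (x :: xs).getD ((j : Int) - s - n).toNat 0
          = xs.getD ((j : Int) - (s + 1) - n).toNat 0 := by
        rw [← hidx]; rfl
      rw [hxs]
    · rw [if_neg hj]
      by_cases hj0 : (j : Int) = s + n
      · have hjn : j = (s + n).toNat := by omega
        have hin : (s + n).toNat < t.length := by omega
        rw [if_pos (by omega), hjn, List.getD_eq_getElem?_getD,
            List.getElem?_set_self hin, Option.getD_some]
        have h0 : ((((s + n).toNat : Nat) : Int) - s - n).toNat = 0 := by omega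
        rw [h0]
        rfl
      · rw [if_neg (by omega), List.getD_eq_getElem?_getD,
            List.getElem?_set_ne (by omega), ← List.getD_eq_getElem?_getD]

-- A's down-sweep: once every slot above m holds B's node value, sweeping m,…,1 makes every
-- positive slot hold B's node value
lemma pvDown_char (n : Int) (leaf : List (List Int)) (hleaf : ∀ l ∈ leaf, l.length ≤ 1) :
    ∀ (m : Int) (t : List (List Int)), m < n → t.length = (2 * n).toNat →
      (∀ j : Nat, m < (j : Int) → (j : Int) < 2 * n → t.getD j [] = pvNode n leaf (j : Int)) →
      ∀ j : Nat, 0 < (j : Int) → (j : Int) < 2 * n →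
      ((PySem.List.pyRange m 0 (-1)).foldl
        (fun t i => PySem.List.pySetD t i
          (pvMergeA (PySem.List.pyGetD t (2 * i) []) (PySem.List.pyGetD t (2 * i + 1) []))) t).getD j []
      = pvNode n leaf (j : Int)
  | m, t, hmn, htlen, ht, j => by
    by_cases hm : m ≤ 0
    · rw [PySem.List.pyRange_neg_one_eq_nil hm]
      intro hj1 hj2
      exact ht j (by omega) hj2
    · rw [PySem.List.pyRange_neg_one_cons (by omega), List.foldl_cons]
      have h2m : (0:Int) ≤ 2 * m := by omega
      have h2m1 : (0:Int) ≤ 2 * m + 1 := by omega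
      have hg1 : PySem.List.pyGetD t (2 * m) [] = pvNode n leaf (2 * m) := by
        rw [PySem.List.pyGetD_of_nonneg _ _ h2m]
        have := ht (2 * m).toNat (by omega) (by omega)
        rwa [Int.toNat_of_nonneg h2m] at this
      have hg2 : PySem.List.pyGetD t (2 * m + 1) [] = pvNode n leaf (2 * m + 1) := by
        rw [PySem.List.pyGetD_of_nonneg _ _ h2m1]
        have := ht (2 * m + 1).toNat (by omega) (by omega)
        rwa [Int.toNat_of_nonneg h2m1] at this
      have hstep : PySem.List.pySetD t m
          (pvMergeA (PySem.List.pyGetD t (2 * m) []) (PySem.List.pyGetD t (2 * m + 1) []))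
          = t.set m.toNat (pvNode n leaf m) := by
        rw [PySem.List.pySetD_of_nonneg _ _ (by omega), hg1, hg2,
            ← pvNode_combine n leaf hleaf m (by omega) hmn]
      rw [hstep]
      refine pvDown_char n leaf hleaf (m - 1) _ (by omega) (by rw [List.length_set]; exact htlen) ?_ j
      intro k hk1 hk2
      by_cases hk : (k : Int) = m
      · have hkm : k = m.toNat := by omega
        have hin : m.toNat < t.length := by omega
        rw [hkm, List.getD_eq_getElem?_getD, List.getElem?_set_self hin, Option.getD_some,
            Int.toNat_of_nonneg (by omega)]
      · rw [List.getD_eq_getElem?_getD, List.getElem?_set_ne (by omega),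
            ← List.getD_eq_getElem?_getD]
        exact ht k (by omega) hk2
  termination_by m => m.toNat
  decreasing_by omega

-- ===== VERDICT (by name: the statement is the Claim_ definition above) =====
theorem get_ms_tree_spec : Claim_equal_get_ms_tree := by
  intro n nums2 idx_of_a _ hpre
  unfold Spec_get_ms_tree get_ms_tree get_ms_tree_alt
  dsimp only
  rcases hpre with ⟨hn0, hlen, _⟩ | ⟨hneg, hnil⟩
  case inr =>
    subst hnil
    have h1 : (2 * n).toNat = 0 := by omega
    simp [PySem.List.enumerate, h1,
      PySem.List.pyRange_neg_one_eq_nil (show (n - 1 : Int) ≤ 0 by omega),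
      PySem.List.pyRange_one_eq_nil (show (2 * n : Int) ≤ 0 by omega)]
  set leaf := pvLeaf nums2 idx_of_a with hleafdef
  have hleaf : ∀ l ∈ leaf, l.length ≤ 1 := by
    intro l hl
    rcases List.mem_map.mp hl with ⟨v, _, rfl⟩
    simp
  rw [show ((PySem.List.pyRange 0 (2 * n) 1).foldl
      (fun (acc : List (List Int) × PySem.Dict Int (List Int)) i =>
        if 1 ≤ i then
          let rm := pvNodeM n leaf i acc.2
          (acc.1 ++ [rm.1], rm.2)
        else (acc.1 ++ [[]], acc.2)) ([], PySem.Dict.empty)).1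
    = (PySem.List.pyRange 0 (2 * n) 1).map (fun i => if 1 ≤ i then pvNode n leaf i else [])
    from by rw [pvFoldM_eq n leaf _ [] _ (pvInv_empty n leaf), List.nil_append]]
  set t0 : List (List Int) := List.replicate (2 * n).toNat [] with ht0
  set fill := (PySem.List.enumerate nums2).foldl
    (fun t p => PySem.List.pySetD t (p.1 + n)
        (PySem.List.pyGetD t (p.1 + n) [] ++ [PySem.Dict.getD (PySem.Dict.mk idx_of_a) p.2 0])) t0
    with hfilldef
  have hfill_len : fill.length = (2 * n).toNat := by
    rw [hfilldef]
    exact (pvFoldl_len _ _ _ _).trans (List.length_replicate ..)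
  have hfill : ∀ j : Nat, fill.getD j []
      = if n ≤ (j : Int) ∧ (j : Int) < n + nums2.length then
          [PySem.Dict.getD (PySem.Dict.mk idx_of_a) (nums2.getD ((j : Int) - n).toNat 0) 0]
        else [] := by
    intro j
    have := pvFill_char n idx_of_a nums2 0 t0 (by omega)
      (by rw [ht0, List.length_replicate]; omega) j
    rw [hfilldef]
    rw [this]
    have hrep : t0.getD j [] = [] := by rw [ht0]; simp [List.getD]
    rw [hrep]
    by_cases hc : n ≤ (j : Int) ∧ (j : Int) < n + (nums2.length : Int)
    · rw [if_pos (show 0 + n ≤ (j : Int) ∧ (j : Int) < 0 + n + (nums2.length : Int) by omega),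
          if_pos hc, List.nil_append]
      have h0 : ((j : Int) - 0 - n).toNat = ((j : Int) - n).toNat := by omega
      rw [h0]
    · rw [if_neg (show ¬(0 + n ≤ (j : Int) ∧ (j : Int) < 0 + n + (nums2.length : Int)) by omega),
          if_neg hc]
  have hfill_node : ∀ j : Nat, n - 1 < (j : Int) → (j : Int) < 2 * n →
      fill.getD j [] = pvNode n leaf (j : Int) := by
    intro j hj1 hj2
    have hlenleaf : (leaf.length : Int) = (nums2.length : Int) := by
      rw [hleafdef]; simp [pvLeaf]
    rw [pvNode, if_neg (show ¬((j : Int) < 1) by omega),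
        if_pos (show n ≤ (j : Int) by omega), hfill]
    by_cases hc : n ≤ (j : Int) ∧ (j : Int) < n + (nums2.length : Int)
    · rw [if_pos hc, if_pos (show (j : Int) - n < (leaf.length : Int) by omega)]
      rw [hleafdef, pvLeaf]
      have hlt : ((j : Int) - n).toNat < nums2.length := by omega
      simp [List.getD_eq_getElem?_getD, List.getElem?_map, List.getElem?_eq_getElem hlt]
    · rw [if_neg hc, if_neg (show ¬((j : Int) - n < (leaf.length : Int)) by omega)]
  -- both sides elementwise
  apply List.ext_getElem
  · rw [pvFoldl_len, hfill_len, List.length_map, PySem.List.length_pyRange_one]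
    omega
  · intro k hk1 hk2
    have hklen : k < (2 * n).toNat := by
      rwa [pvFoldl_len, hfill_len] at hk1
    have hB : ((PySem.List.pyRange 0 (2 * n) 1).map
        (fun i => if 1 ≤ i then pvNode n leaf i else []))[k]'hk2
        = if 1 ≤ ((k : Int)) then pvNode n leaf (k : Int) else [] := by
      rw [List.getElem_map, PySem.List.getElem_pyRange_one, zero_add]
    rw [hB]
    have hA : ((PySem.List.pyRange (n - 1) 0 (-1)).foldl
        (fun t i => PySem.List.pySetD t i
          (pvMergeA (PySem.List.pyGetD t (2 * i) []) (PySem.List.pyGetD t (2 * i + 1) []))) fill)[k]'hk1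
        = ((PySem.List.pyRange (n - 1) 0 (-1)).foldl
        (fun t i => PySem.List.pySetD t i
          (pvMergeA (PySem.List.pyGetD t (2 * i) []) (PySem.List.pyGetD t (2 * i + 1) []))) fill).getD k [] := by
      rw [List.getD_eq_getElem?_getD, List.getElem?_eq_getElem hk1]
      rfl
    rw [hA]
    by_cases hkpos : 0 < (k : Int)
    · rw [pvDown_char n leaf hleaf (n - 1) fill (by omega) hfill_len hfill_node k hkpos (by omega),
          if_pos (by omega)]
    · -- k = 0: slot 0 is untouched by the sweep and empty after the fill
      have hk0 : k = 0 := by omega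
      rw [if_neg (by omega), hk0]
      have huntouched : ∀ (is : List Int) (t : List (List Int)), (∀ i ∈ is, 0 < i) →
          ((is.foldl (fun t i => PySem.List.pySetD t i
            (pvMergeA (PySem.List.pyGetD t (2 * i) []) (PySem.List.pyGetD t (2 * i + 1) []))) t).getD 0 [])
          = t.getD 0 [] := by
        intro is
        induction is with
        | nil => intro t _; rfl
        | cons i is ih =>
          intro t hpos
          rw [List.foldl_cons, ih _ (fun x hx => hpos x (List.mem_cons_of_mem _ hx))]
          rw [PySem.List.pySetD_of_nonneg _ _ (le_of_lt (hpos i (List.mem_cons_self ..)))]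
          rw [List.getD_eq_getElem?_getD, List.getElem?_set_ne (by
            have := hpos i (List.mem_cons_self ..); omega), ← List.getD_eq_getElem?_getD]
      rw [huntouched _ _ (fun i hi => (PySem.List.mem_pyRange_neg_one.mp hi).1)]
      rw [hfill, if_neg (by intro h; omega)]
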